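-- pv_equiv track=rewrite | github.com/BohdanKrasovskyi/Jezyki_Skryptowe | lista_2/utils.py | is_sentence_with_proper_noun
-- ===== SOURCE A (Python) =====
-- def is_sentence_with_proper_noun(sentence):
--     word = ""
--     first_word = True
--     for char in sentence + " ":
--         if char.isalpha():
--             word += char
--         else:
--             if word != "":
--                 if not first_word and word[0].isupper():
--                     return True
--                 first_word = False
--                 word = ""
--     return False
-- ===== SOURCE B (Python) =====
-- def is_sentence_with_proper_noun(sentence):
--     # Word-start positions: index i holds an alphabetic char not preceded by one.
--     starts = [i for i, ch in enumerate(sentence)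
--               if ch.isalpha() and (i == 0 or not sentence[i - 1].isalpha())]
--     # True iff some non-first word starts with an uppercase letter.
--     return any(sentence[i].isupper() for i in starts[1:])
-- ===== Notes on version B (the rewrite author's own statement) =====
-- stated objective: alternative
-- what changed: Instead of A's streaming char loop with a word accumulator and first_word flag, B computes the list of word-start indices (alphabetic char not preceded by one) via enumerate, then checks whether the character at any start index after the first is uppercase.
import Mathlib
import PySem

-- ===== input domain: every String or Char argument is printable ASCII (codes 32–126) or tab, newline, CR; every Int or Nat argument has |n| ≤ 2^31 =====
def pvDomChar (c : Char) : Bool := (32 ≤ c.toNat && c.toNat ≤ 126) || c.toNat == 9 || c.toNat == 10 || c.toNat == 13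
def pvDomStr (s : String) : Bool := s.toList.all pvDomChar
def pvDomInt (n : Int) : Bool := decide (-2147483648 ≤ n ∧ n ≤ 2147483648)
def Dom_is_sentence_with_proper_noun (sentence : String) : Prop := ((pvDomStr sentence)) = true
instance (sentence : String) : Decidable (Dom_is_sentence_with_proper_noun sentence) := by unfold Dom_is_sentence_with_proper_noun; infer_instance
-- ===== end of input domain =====

-- B replaces A's streaming accumulator/flag loop by an index-based formulation:
-- collect the word-start indices, then test the char at each start index after the first (alternative).

-- ===== PORT A =====
-- the loop body of A: state = (current word as List Char, first_word flag); early return = `true`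
def pvGoA (cs : List Char) (word : List Char) (first : Bool) : Bool :=
  match cs with
  | [] => false
  | c :: rest =>
    if PySem.Chars.isalpha c then
      pvGoA rest (word ++ [c]) first
    else
      if word ≠ [] then
        if !first && PySem.Chars.isupper (word.headD ' ') then true   -- word[0]: word is nonempty here
        else pvGoA rest [] false
      else pvGoA rest word first

def is_sentence_with_proper_noun (sentence : String) : Bool :=
  pvGoA (sentence.toList ++ [' ']) [] true   -- for char in sentence + " "

-- ===== PORT B =====
-- [i for i, ch in enumerate(sentence) if ch.isalpha() and (i == 0 or not sentence[i-1].isalpha())]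
-- sentence[i-1] is only reached with i >= 1, hence in range: pyGetD is exact there.
def pvStarts (s : List Char) : List Int :=
  (PySem.List.enumerate s).filterMap (fun p =>
    if PySem.Chars.isalpha p.2 &&
        (p.1 == 0 || !PySem.Chars.isalpha (PySem.List.pyGetD s (p.1 - 1) ' ')) then
      some p.1
    else none)

-- any(sentence[i].isupper() for i in starts[1:]); each i is in range, pyGetD is exact.
def is_sentence_with_proper_noun_alt (sentence : String) : Bool :=
  ((pvStarts sentence.toList).drop 1).any
    (fun i => PySem.Chars.isupper (PySem.List.pyGetD sentence.toList i ' '))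

-- ===== PRECONDITION & SPEC =====
def Spec_is_sentence_with_proper_noun (sentence : String) (out : Bool) : Prop := out = is_sentence_with_proper_noun_alt sentence
instance (sentence : String) (out : Bool) : Decidable (Spec_is_sentence_with_proper_noun sentence out) := by unfold Spec_is_sentence_with_proper_noun; infer_instance

-- ===== CLAIM (what is proved, stated in full; the proofs are below) =====
def Claim_equal_is_sentence_with_proper_noun : Prop := ∀ (sentence : String), Dom_is_sentence_with_proper_noun sentence → Spec_is_sentence_with_proper_noun sentence (is_sentence_with_proper_noun sentence)

-- ===== LEMMAS AND PROOFS =====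

-- common reference: the first characters of the maximal alphabetic runs,
-- scanned with a "previous char was alphabetic" flag
def pvWsc (cs : List Char) (prev : Bool) : List Char :=
  match cs with
  | [] => []
  | c :: rest =>
    if PySem.Chars.isalpha c && !prev then c :: pvWsc rest true
    else pvWsc rest (PySem.Chars.isalpha c)

theorem pvStarts_map (t : List Char) : ∀ (s : List Char) (k : Nat) (prev : Bool),
    s.drop k = t →
    (k = 0 → prev = false) →
    (k ≠ 0 → prev = PySem.Chars.isalpha (s.getD (k - 1) ' ')) →
    ((PySem.List.enumerate t (k : Int)).filterMap (fun p =>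
        if PySem.Chars.isalpha p.2 &&
            (p.1 == 0 || !PySem.Chars.isalpha (PySem.List.pyGetD s (p.1 - 1) ' ')) then
          some p.1
        else none)).map (fun i => PySem.List.pyGetD s i ' ') = pvWsc t prev := by
  induction t with
  | nil => intro s k prev _ _ _; simp [PySem.List.enumerate, pvWsc]
  | cons c rest ih =>
    intro s k prev hdrop h0 h1
    have hsome : s[k]? = some c := by
      have h2 := congrArg (fun l => l[0]?) hdrop
      simpa using h2
    have hdrop' : s.drop (k + 1) = rest := by
      have h3 : (s.drop k).drop 1 = s.drop (k + 1) := by rw [List.drop_drop]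
      rw [← h3, hdrop]; simp
    have hguard : (PySem.Chars.isalpha c &&
        (((k : Int)) == 0 || !PySem.Chars.isalpha (PySem.List.pyGetD s ((k : Int) - 1) ' ')))
        = (PySem.Chars.isalpha c && !prev) := by
      rcases Nat.eq_zero_or_pos k with hk | hk
      · subst hk; rw [h0 rfl]; simp
      · have hbeq : (((k : Int)) == 0) = false := by
          simp only [beq_eq_false_iff_ne, ne_eq]
          omega
        have hcast : (k : Int) - 1 = ((k - 1 : Nat) : Int) := by omega
        rw [hbeq, hcast, PySem.List.pyGetD_natCast, ← h1 (by omega)]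
        simp
    rw [PySem.List.enumerate_cons, List.filterMap_cons,
        show ((k : Int) + 1) = ((k + 1 : Nat) : Int) by push_cast; ring]
    by_cases hc : (PySem.Chars.isalpha c && !prev) = true
    · have halpha : PySem.Chars.isalpha c = true := by
        cases h : PySem.Chars.isalpha c <;> simp [h] at hc ⊢
      simp only [hguard, hc, if_pos, List.map_cons]
      rw [PySem.List.pyGetD_natCast,
          show s.getD k ' ' = c by simp [List.getD, hsome],
          ih s (k + 1) true hdrop' (by omega)
            (fun _ => by simp [List.getD, hsome, halpha])]
      simp [pvWsc, hc]
    · have hc' : (PySem.Chars.isalpha c && !prev) = false := by simpa using hc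
      simp only [hguard, hc', if_neg, Bool.false_eq_true, not_false_eq_true]
      rw [ih s (k + 1) (PySem.Chars.isalpha c) hdrop' (by omega)
            (fun _ => by simp [List.getD, hsome])]
      simp [pvWsc, hc']

theorem pvAnyMapTail (L : List Int) (g : Int → Char) :
    ((L.map g).drop 1).any PySem.Chars.isupper
      = (L.drop 1).any (fun i => PySem.Chars.isupper (g i)) := by
  cases L <;> simp [List.any_map, Function.comp_def]

theorem pvGoA_eq (cs : List Char) : ∀ (word : List Char) (first : Bool),
    pvGoA (cs ++ [' ']) word first =
      ((if first then (if word = [] then pvWsc cs false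
                       else word.headD ' ' :: pvWsc cs true).drop 1
        else (if word = [] then pvWsc cs false
              else word.headD ' ' :: pvWsc cs true)).any PySem.Chars.isupper) := by
  induction cs with
  | nil =>
    intro word first
    have hsp : PySem.Chars.isalpha ' ' = false := by decide
    match word with
    | [] => cases first <;> simp [pvGoA, pvWsc, hsp]
    | a :: w => cases first <;> simp [pvGoA, pvWsc, hsp]
  | cons c rest ih =>
    intro word first
    by_cases hc : PySem.Chars.isalpha c = true
    · have hstep : pvGoA ((c :: rest) ++ [' ']) word first
          = pvGoA (rest ++ [' ']) (word ++ [c]) first := by simp [pvGoA, hc]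
      rw [hstep, ih (word ++ [c]) first]
      match word with
      | [] => simp [pvWsc, hc]
      | a :: w => simp [pvWsc, hc]
    · have hc' : PySem.Chars.isalpha c = false := by simpa using hc
      match word with
      | [] =>
        have hstep : pvGoA ((c :: rest) ++ [' ']) [] first
            = pvGoA (rest ++ [' ']) [] first := by simp [pvGoA, hc']
        rw [hstep, ih [] first]
        simp [pvWsc, hc']
      | a :: w =>
        have hstep : pvGoA ((c :: rest) ++ [' ']) (a :: w) first
            = (if !first && PySem.Chars.isupper ((a :: w).headD ' ') then true
               else pvGoA (rest ++ [' ']) [] false) := by simp [pvGoA, hc']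
        rw [hstep, ih [] false]
        cases first
        · by_cases hu : PySem.Chars.isupper a = true <;> simp [pvWsc, hc', hu]
        · simp [pvWsc, hc']

theorem pvGoA_top (cs : List Char) :
    pvGoA (cs ++ [' ']) [] true = ((pvWsc cs false).drop 1).any PySem.Chars.isupper := by
  rw [pvGoA_eq]; simp

-- ===== VERDICT (by name: the statement is the Claim_ definition above) =====
theorem is_sentence_with_proper_noun_spec : Claim_equal_is_sentence_with_proper_noun := by
  intro sentence _
  unfold Spec_is_sentence_with_proper_noun is_sentence_with_proper_noun is_sentence_with_proper_noun_alt pvStarts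
  rw [pvGoA_top]
  have hmap := pvStarts_map sentence.toList sentence.toList 0 false (by simp) (fun _ => rfl)
    (fun h => absurd rfl h)
  rw [Nat.cast_zero] at hmap
  rw [← hmap, pvAnyMapTail]
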